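-- pv_equiv track=rewrite | github.com/AnalysisOfAlgorithmsProjects/Project1 | Greedy.py | varint_bits
-- ===== SOURCE A (Python) =====
-- def varint_bits(x):
--     if x <= 0:
--         return 8  # one byte minimum
--     bits = 0
--     while x > 0:
--         x >>= 7
--         bits += 8
--     return bits
-- ===== SOURCE B (Python) =====
-- def varint_bits(x):
--     if x <= 0:
--         return 8  # one byte minimum
--     return 8 * ((x.bit_length() + 6) // 7)
-- ===== Notes on version B (the rewrite author's own statement) =====
-- stated objective: simpler
-- what changed: Replaces the shift-by-7 while-loop with a closed form 8*ceil(bit_length/7) via int.bit_length.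
import Mathlib
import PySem

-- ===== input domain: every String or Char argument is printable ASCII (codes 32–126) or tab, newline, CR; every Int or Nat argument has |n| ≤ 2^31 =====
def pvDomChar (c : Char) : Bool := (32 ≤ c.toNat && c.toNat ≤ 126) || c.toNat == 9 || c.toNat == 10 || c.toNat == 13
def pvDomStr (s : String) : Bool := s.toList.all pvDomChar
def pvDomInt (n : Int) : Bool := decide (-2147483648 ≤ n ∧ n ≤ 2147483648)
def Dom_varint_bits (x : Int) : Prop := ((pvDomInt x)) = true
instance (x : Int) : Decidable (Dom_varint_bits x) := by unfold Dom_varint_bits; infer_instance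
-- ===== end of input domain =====

-- B replaces A's shift-by-7 counting loop with the closed form 8 * ceil(bit_length/7) (simpler).

-- ===== PORT A =====
-- termination helper for the while-loop: x >>= 7 strictly shrinks a positive x
theorem pvLoopDec (x : Int) (hx : 0 < x) :
    (PySem.Int.floordiv x 128).toNat < x.toNat := by
  rw [PySem.Int.floordiv_eq_ediv_of_pos (by omega)]
  omega

-- while x > 0: x >>= 7; bits += 8   (x >> 7 is floor division by 2^7)
def varintLoop (x : Int) (bits : Int) : Int :=
  if h : 0 < x then
    varintLoop (PySem.Int.floordiv x 128) (bits + 8)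
  else bits
termination_by x.toNat
decreasing_by exact pvLoopDec x h

def varint_bits (x : Int) : Int :=
  if x ≤ 0 then 8
  else varintLoop x 0

-- ===== PORT B =====
def varint_bits_alt (x : Int) : Int :=
  if x ≤ 0 then 8
  else 8 * (PySem.Int.floordiv ((PySem.Int.bitLength x : Int) + 6) 7)

-- ===== PRECONDITION & SPEC =====
def Spec_varint_bits (x : Int) (out : Int) : Prop := out = varint_bits_alt x
instance (x : Int) (out : Int) : Decidable (Spec_varint_bits x out) := by unfold Spec_varint_bits; infer_instance

-- ===== CLAIM (what is proved, stated in full; the proofs are below) =====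
def Claim_equal_varint_bits : Prop := ∀ (x : Int), Dom_varint_bits x → Spec_varint_bits x (varint_bits x)

-- ===== LEMMAS AND PROOFS =====

-- bitLength of a nonnegative Int is Nat.size of its absolute value
theorem pvBitLength_eq_size (x : Int) (hx : 0 ≤ x) :
    PySem.Int.bitLength x = Nat.size x.natAbs := by
  rcases eq_or_lt_of_le hx with h0 | h0
  · simp [← h0]
  · apply le_antisymm
    · have h1 := PySem.Int.two_pow_bitLength_le x (by omega)
      have h2 : PySem.Int.bitLength x - 1 < Nat.size x.natAbs := Nat.lt_size.mpr h1
      have h3 : 0 < PySem.Int.bitLength x := by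
        by_contra h
        have he : PySem.Int.bitLength x = 0 := by omega
        have hl := PySem.Int.lt_two_pow_bitLength x
        rw [he, pow_zero] at hl
        omega
      omega
    · exact Nat.size_le.mpr (PySem.Int.lt_two_pow_bitLength x)

-- Nat.size drops by exactly 7 under division by 2^7
theorem pvSize_div128 (n : Nat) : Nat.size (n / 128) = Nat.size n - 7 := by
  apply le_antisymm
  · apply Nat.size_le.mpr
    by_cases h : Nat.size n ≤ 7
    · have hn : n < 128 := lt_of_lt_of_le (Nat.size_le.mp (le_refl _))
        (Nat.pow_le_pow_right (by norm_num) h)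
      have : n / 128 = 0 := Nat.div_eq_of_lt hn
      rw [this]; positivity
    · push_neg at h
      have hn : n < 2 ^ Nat.size n := Nat.size_le.mp (le_refl _)
      apply (Nat.div_lt_iff_lt_mul (by norm_num)).mpr
      calc n < 2 ^ Nat.size n := hn
        _ = 2 ^ (Nat.size n - 7) * 128 := by
            rw [show (128 : Nat) = 2 ^ 7 from rfl, ← pow_add]
            congr 1; omega
  · by_cases h : Nat.size n ≤ 7
    · omega
    · push_neg at h
      have hle : 2 ^ (Nat.size n - 1) ≤ n := by
        rcases Nat.eq_zero_or_pos n with h0 | h0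
        · simp [h0] at h
        · exact Nat.lt_size.mp (by omega)
      have hdiv : 2 ^ (Nat.size n - 8) ≤ n / 128 := by
        apply (Nat.le_div_iff_mul_le (by norm_num)).mpr
        calc 2 ^ (Nat.size n - 8) * 128 = 2 ^ (Nat.size n - 1) := by
              rw [show (128 : Nat) = 2 ^ 7 from rfl, ← pow_add]
              congr 1; omega
          _ ≤ n := hle
      have := Nat.lt_size.mpr hdiv
      omega

-- the loop computes bits + 8 * ceil(size/7)
theorem pvLoop_closed : ∀ (n : Nat) (x bits : Int), x.toNat = n → 0 ≤ x →
    varintLoop x bits = bits + 8 * (((Nat.size x.natAbs + 6) / 7 : Nat) : Int) := by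
  intro n
  induction n using Nat.strong_induction_on with
  | _ n ih =>
    intro x bits hxn hx
    rw [varintLoop]
    split_ifs with h
    · have hfd : PySem.Int.floordiv x 128 = ((x.toNat / 128 : Nat) : Int) := by
        rw [show x = ((x.toNat : Nat) : Int) by omega]
        exact_mod_cast PySem.Int.floordiv_natCast x.toNat 128
      have hdec : x.toNat / 128 < n := by
        have := pvLoopDec x h; omega
      have hrec := ih (x.toNat / 128) hdec (PySem.Int.floordiv x 128) (bits + 8)
        (by rw [hfd]; omega) (by rw [hfd]; positivity)
      rw [hrec, hfd]
      have hab : ((((x.toNat / 128 : Nat) : Int)).natAbs) = x.toNat / 128 := by omega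
      have hxb : x.natAbs = x.toNat := by omega
      rw [hab, hxb]
      have hs : 0 < Nat.size x.toNat := Nat.size_pos.mpr (by omega)
      have hd := pvSize_div128 x.toNat
      have key : (Nat.size (x.toNat / 128) + 6) / 7 + 1 = (Nat.size x.toNat + 6) / 7 := by
        omega
      push_cast [← key]
      ring
    · have hx0 : x = 0 := by omega
      subst hx0
      simp

-- ===== VERDICT (by name: the statement is the Claim_ definition above) =====
theorem varint_bits_spec : Claim_equal_varint_bits := by
  intro x _
  unfold Spec_varint_bits varint_bits varint_bits_alt
  split_ifs with h
  · rfl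
  · push_neg at h
    rw [pvLoop_closed x.toNat x 0 rfl (by omega), pvBitLength_eq_size x (by omega)]
    rw [PySem.Int.floordiv_eq_ediv_of_pos (by norm_num)]
    have : ((Nat.size x.natAbs : Nat) : Int) + 6 = (((Nat.size x.natAbs + 6 : Nat)) : Int) := by push_cast; ring
    rw [this]
    rw [show (((Nat.size x.natAbs + 6 : Nat)) : Int) / (7:Int) = (((Nat.size x.natAbs + 6) / 7 : Nat) : Int) from by exact_mod_cast Int.natCast_div (Nat.size x.natAbs + 6) 7]
    ring
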